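-- pv_equiv track=rewrite | github.com/piyushchourey/webscraller-URL | pages/enrichment.py | _get_email_verification_counts
-- ===== SOURCE A (Python) =====
-- from typing import Any
--
-- def _get_email_verification_counts(contact_rows: list[dict[str, Any]]) -> tuple[int, int]:
--     """Return valid and invalid email counts from contact-level rows."""
--     valid_count = 0
--     invalid_count = 0
--
--     for row in contact_rows:
--         status = str(row.get("Verification_Status") or "").strip().lower()
--         if status == "valid":
--             valid_count += 1
--         elif status:
--             invalid_count += 1
--
--     return valid_count, invalid_count
-- ===== SOURCE B (Python) =====
-- def _get_email_verification_counts(contact_rows):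
--     """Return valid and invalid email counts from contact-level rows."""
--     freq = {}
--     for row in contact_rows:
--         status = str(row.get("Verification_Status") or "").strip().lower()
--         freq[status] = freq.get(status, 0) + 1
--     valid_count = freq.get("valid", 0)
--     invalid_count = sum(freq.values()) - freq.get("", 0) - valid_count
--     return valid_count, invalid_count
-- ===== Notes on version B (the rewrite author's own statement) =====
-- stated objective: alternative
-- what changed: Replaced A's per-row if/elif branching on each status with a frequency table: the loop only tallies every normalized status into a dict, and the valid/invalid split is derived arithmetically afterward (invalid = total - blanks - valids).
import Mathlib
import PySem

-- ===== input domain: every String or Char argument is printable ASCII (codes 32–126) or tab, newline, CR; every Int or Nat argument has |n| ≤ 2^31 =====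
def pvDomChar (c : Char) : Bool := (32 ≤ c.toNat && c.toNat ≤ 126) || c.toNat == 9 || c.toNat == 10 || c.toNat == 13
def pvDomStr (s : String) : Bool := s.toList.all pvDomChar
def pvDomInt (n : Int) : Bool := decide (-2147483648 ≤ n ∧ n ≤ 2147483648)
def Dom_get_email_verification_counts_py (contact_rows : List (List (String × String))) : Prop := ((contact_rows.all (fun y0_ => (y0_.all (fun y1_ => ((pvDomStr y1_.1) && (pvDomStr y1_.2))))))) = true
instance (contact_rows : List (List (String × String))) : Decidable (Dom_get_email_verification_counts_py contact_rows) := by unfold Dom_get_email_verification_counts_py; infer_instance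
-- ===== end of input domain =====

-- B replaces A's per-row if/elif branching with a frequency dict tallied in the loop; the valid/invalid split is derived arithmetically afterward. Objective: alternative decomposition.


-- ===== PORT A =====
-- status = str(row.get("Verification_Status") or "").strip().lower(): with string values,
-- `get(...) or ""` is exactly getD with default "" (the only falsy string is "", which `or` maps to "").
def pvNormStatus (row : List (String × String)) : String :=
  PySem.Str.lower (PySem.Str.strip (PySem.Dict.getD ⟨row⟩ "Verification_Status" ""))

-- loop body: the two counter updates of A's for-loop
def pvStepA (acc : Int × Int) (row : List (String × String)) : Int × Int :=
  let status := pvNormStatus row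
  if status == "valid" then (acc.1 + 1, acc.2)
  else if status ≠ "" then (acc.1, acc.2 + 1)
  else acc

def get_email_verification_counts_py (contact_rows : List (List (String × String))) : Int × Int :=
  contact_rows.foldl pvStepA (0, 0)

-- ===== PORT B =====
-- freq[status] = freq.get(status, 0) + 1, then the split is read off the table.
def get_email_verification_counts_py_alt (contact_rows : List (List (String × String))) : Int × Int :=
  let freq : PySem.Dict String Int :=
    contact_rows.foldl
      (fun d row =>
        let status := pvNormStatus row
        d.insert status (d.getD status 0 + 1))
      PySem.Dict.empty
  let valid_count := freq.getD "valid" 0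
  let invalid_count := (PySem.Dict.values freq).sum - freq.getD "" 0 - valid_count
  (valid_count, invalid_count)

-- ===== PRECONDITION & SPEC =====
def Spec_get_email_verification_counts_py (contact_rows : List (List (String × String))) (out : Int × Int) : Prop := out = get_email_verification_counts_py_alt contact_rows
instance (contact_rows : List (List (String × String))) (out : Int × Int) : Decidable (Spec_get_email_verification_counts_py contact_rows out) := by unfold Spec_get_email_verification_counts_py; infer_instance

-- ===== CLAIM =====
def Claim_equal_get_email_verification_counts_py : Prop := ∀ (contact_rows : List (List (String × String))), Dom_get_email_verification_counts_py contact_rows → Spec_get_email_verification_counts_py contact_rows (get_email_verification_counts_py contact_rows)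

-- ===== LEMMAS AND PROOFS =====
-- A's loop invariant: the fold from (v, i) adds (count of "valid", count of non-blank non-"valid").
lemma pv_fold_inv (rows : List (List (String × String))) (v i : Int) :
    rows.foldl pvStepA (v, i)
    = (v + ((rows.map pvNormStatus).count "valid" : Int),
       i + ((rows.length : Int) - ((rows.map pvNormStatus).count "" : Int)
             - ((rows.map pvNormStatus).count "valid" : Int))) := by
  induction rows generalizing v i with
  | nil => simp
  | cons r rs ih =>
    rw [List.foldl_cons]
    by_cases hv : pvNormStatus r = "valid"
    · rw [show pvStepA (v, i) r = (v + 1, i) from by simp [pvStepA, hv], ih]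
      simp only [List.map_cons, List.count_cons, List.length_cons, hv, Prod.mk.injEq]
      constructor <;> simp <;> push_cast <;> ring
    · by_cases he : pvNormStatus r = ""
      · rw [show pvStepA (v, i) r = (v, i) from by simp [pvStepA, he], ih]
        simp only [List.map_cons, List.count_cons, List.length_cons, Prod.mk.injEq]
        constructor <;> simp [he] <;> push_cast <;> ring
      · rw [show pvStepA (v, i) r = (v, i + 1) from by simp [pvStepA, hv, he], ih]
        simp only [List.map_cons, List.count_cons, List.length_cons, Prod.mk.injEq]
        constructor <;> simp [hv, he] <;> push_cast <;> ring

-- B's tally loop is exactly collections.Counter of the normalized statuses.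
lemma pv_freq_eq_counter (rows : List (List (String × String))) :
    rows.foldl
      (fun d row =>
        let status := pvNormStatus row
        d.insert status (d.getD status 0 + 1))
      PySem.Dict.empty
    = PySem.Dict.counter (rows.map pvNormStatus) := by
  rw [← PySem.Dict.foldl_insert_getD_add_one_eq_counter, List.foldl_map]

-- sum of a Counter's values = length of the tallied list
lemma pv_sum_counter_values (xs : List String) :
    (PySem.Dict.values (PySem.Dict.counter xs)).sum = (xs.length : Int) := by
  rw [PySem.Dict.values_eq_map_keys _ (PySem.Dict.nodup_keys_counter xs) 0, PySem.Dict.keys_counter]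
  have hperm : ((PySem.Set.ofList xs).map (fun k => (PySem.Dict.counter xs).getD k 0)).Perm
      (xs.dedup.map (fun k => (PySem.Dict.counter xs).getD k 0)) :=
    ((List.perm_ext_iff_of_nodup (PySem.Set.nodup_ofList xs) xs.nodup_dedup).2
      (by intro a; simp [PySem.Set.mem_ofList])).map _
  rw [hperm.sum_eq, ← List.sum_map_count_dedup_eq_length xs]
  simp [PySem.Dict.getD_counter, Nat.cast_list_sum, List.map_map, Function.comp_def]

-- ===== VERDICT =====
theorem get_email_verification_counts_py_spec : Claim_equal_get_email_verification_counts_py := by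
  intro rows _
  unfold Spec_get_email_verification_counts_py get_email_verification_counts_py
    get_email_verification_counts_py_alt
  rw [pv_fold_inv, pv_freq_eq_counter]
  simp only [pv_sum_counter_values, PySem.Dict.getD_counter, List.length_map]
  simp only [Prod.mk.injEq]
  omega
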